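-- pv_equiv track=rewrite | github.com/jordan-reinaldo/password | main.py | mdp_valide
-- ===== SOURCE A (Python) =====
-- def mdp_valide(password):
--     erreurs = []
--     # critères de sécurité
--     if len(password) < 8:
--         erreurs.append("Le mot de passe doit avoir au moins 8 caractères.")
--     if not any(c.isupper() for c in password):
--         erreurs.append("Le mot de passe doit contenir au moins une lettre majuscule.")
--     if not any(c.islower() for c in password):
--         erreurs.append("Le mot de passe doit contenir au moins une lettre minuscule.")
--     if not any(c.isdigit() for c in password):
--         erreurs.append("Le mot de passe doit contenir au moins un chiffre.")
--     if not any(c in '!@#$%^&*' for c in password):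
--         erreurs.append("Le mot de passe doit contenir au moins un caractère spécial (!@#$%^&*).")
--
--     return erreurs
-- ===== SOURCE B (Python) =====
-- def mdp_valide(password):
--     has_upper = has_lower = has_digit = has_special = False
--     for c in password:
--         if c.isupper():
--             has_upper = True
--         if c.islower():
--             has_lower = True
--         if c.isdigit():
--             has_digit = True
--         if c in '!@#$%^&*':
--             has_special = True
--     erreurs = []
--     if len(password) < 8:
--         erreurs.append("Le mot de passe doit avoir au moins 8 caractères.")
--     if not has_upper:
--         erreurs.append("Le mot de passe doit contenir au moins une lettre majuscule.")
--     if not has_lower: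
--         erreurs.append("Le mot de passe doit contenir au moins une lettre minuscule.")
--     if not has_digit:
--         erreurs.append("Le mot de passe doit contenir au moins un chiffre.")
--     if not has_special:
--         erreurs.append("Le mot de passe doit contenir au moins un caractère spécial (!@#$%^&*).")
--     return erreurs
-- ===== Notes on version B (the rewrite author's own statement) =====
-- stated objective: alternative
-- what changed: Replaces A's four separate any()-scans of the password with a single pass that maintains four boolean flags, then emits the same messages in the same order from the flags.
import Mathlib
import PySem

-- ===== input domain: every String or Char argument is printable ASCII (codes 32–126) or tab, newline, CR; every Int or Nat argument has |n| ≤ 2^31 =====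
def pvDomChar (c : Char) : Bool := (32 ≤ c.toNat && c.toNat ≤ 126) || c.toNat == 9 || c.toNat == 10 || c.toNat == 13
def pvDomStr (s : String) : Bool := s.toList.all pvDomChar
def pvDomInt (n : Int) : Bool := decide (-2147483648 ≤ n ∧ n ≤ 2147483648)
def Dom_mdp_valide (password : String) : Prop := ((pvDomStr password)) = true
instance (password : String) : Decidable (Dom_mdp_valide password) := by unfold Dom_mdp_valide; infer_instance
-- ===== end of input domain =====

-- B replaces A's four separate any()-scans with one single pass keeping four boolean flags (alternative decomposition, same cost class).

-- ===== PORT A =====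
def mdp_valide (password : String) : List String :=
  let cs := password.toList
  let erreurs : List String := []
  let erreurs := if PySem.Chars.len cs < 8 then
      erreurs ++ ["Le mot de passe doit avoir au moins 8 caractères."] else erreurs
  let erreurs := if !(cs.any PySem.Chars.isupper) then
      erreurs ++ ["Le mot de passe doit contenir au moins une lettre majuscule."] else erreurs
  let erreurs := if !(cs.any PySem.Chars.islower) then
      erreurs ++ ["Le mot de passe doit contenir au moins une lettre minuscule."] else erreurs
  let erreurs := if !(cs.any PySem.Chars.isdigit) then
      erreurs ++ ["Le mot de passe doit contenir au moins un chiffre."] else erreurs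
  let erreurs := if !(cs.any (fun c => ("!@#$%^&*".toList).contains c)) then
      erreurs ++ ["Le mot de passe doit contenir au moins un caractère spécial (!@#$%^&*)."] else erreurs
  erreurs

-- ===== PORT B =====
-- one character in B's loop body: update the four flags
def mdpAltStep (st : Bool × Bool × Bool × Bool) (c : Char) : Bool × Bool × Bool × Bool :=
  ((if PySem.Chars.isupper c then true else st.1),
   (if PySem.Chars.islower c then true else st.2.1),
   (if PySem.Chars.isdigit c then true else st.2.2.1),
   (if ("!@#$%^&*".toList).contains c then true else st.2.2.2))

def mdp_valide_alt (password : String) : List String :=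
  let flags := password.toList.foldl mdpAltStep (false, false, false, false)
  let e1 : List String := if PySem.Chars.len password.toList < 8 then
      ["Le mot de passe doit avoir au moins 8 caractères."] else []
  let e2 : List String := if !flags.1 then
      ["Le mot de passe doit contenir au moins une lettre majuscule."] else []
  let e3 : List String := if !flags.2.1 then
      ["Le mot de passe doit contenir au moins une lettre minuscule."] else []
  let e4 : List String := if !flags.2.2.1 then
      ["Le mot de passe doit contenir au moins un chiffre."] else []
  let e5 : List String := if !flags.2.2.2 then
      ["Le mot de passe doit contenir au moins un caractère spécial (!@#$%^&*)."] else []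
  e1 ++ e2 ++ e3 ++ e4 ++ e5

-- ===== PRECONDITION & SPEC =====
def Spec_mdp_valide (password : String) (out : List String) : Prop := out = mdp_valide_alt password
instance (password : String) (out : List String) : Decidable (Spec_mdp_valide password out) := by unfold Spec_mdp_valide; infer_instance

-- ===== CLAIM (what is proved, stated in full; the proofs are below) =====
def Claim_equal_mdp_valide : Prop := ∀ (password : String), Dom_mdp_valide password → Spec_mdp_valide password (mdp_valide password)

-- ===== LEMMAS AND PROOFS =====
theorem mdpAltStep_foldl (cs : List Char) (a b c d : Bool) :
    cs.foldl mdpAltStep (a, b, c, d) =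
      (a || cs.any PySem.Chars.isupper,
       b || cs.any PySem.Chars.islower,
       c || cs.any PySem.Chars.isdigit,
       d || cs.any (fun x => ("!@#$%^&*".toList).contains x)) := by
  induction cs generalizing a b c d with
  | nil => simp
  | cons x xs ih =>
    simp only [List.foldl_cons, List.any_cons, mdpAltStep, ih]
    cases hx : PySem.Chars.isupper x <;>
    cases hy : PySem.Chars.islower x <;>
    cases hz : PySem.Chars.isdigit x <;>
    cases hw : ("!@#$%^&*".toList).contains x <;> simp

-- ===== VERDICT (by name: the statement is the Claim_ definition above) =====
theorem mdp_valide_spec : Claim_equal_mdp_valide := by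
  intro password _
  unfold Spec_mdp_valide mdp_valide mdp_valide_alt
  simp only [mdpAltStep_foldl, Bool.false_or]
  split_ifs <;> simp_all
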